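-- pv_equiv track=rewrite | github.com/sayedgamal99/Problem-Solving | Python/CodeForces/4ParkFountains.py | solution
-- ===== SOURCE A (Python) =====
-- from bisect import bisect_right, bisect_left
--
-- def solution(n, q, A, Q):
--     Q.sort()
--     answer = 0
--     for i, a in enumerate(A):
--         bi = bisect_right(Q, i)
--         num = q-bi
--         if num >= a:
--             answer += 1
--
--     return answer
-- ===== SOURCE B (Python) =====
-- def solution(n, q, A, Q):
--     # counting pass over Q instead of sort + per-index binary search;
--     # does not mutate Q (A sorts Q in place); return value identical
--     m = len(A)
--     below = 0
--     hist = {}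
--     for x in Q:
--         if x < 0:
--             below += 1
--         elif x < m:
--             hist[x] = hist.get(x, 0) + 1
--     answer = 0
--     le = below
--     for i, a in enumerate(A):
--         le += hist.get(i, 0)
--         if q - le >= a:
--             answer += 1
--     return answer
-- ===== Notes on version B (the rewrite author's own statement) =====
-- stated objective: faster
-- what changed: Replaces sort-Q-then-binary-search-per-index with one counting pass over Q (negatives plus a histogram of values in [0, len(A))) and a running prefix count while scanning A.
import Mathlib
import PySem

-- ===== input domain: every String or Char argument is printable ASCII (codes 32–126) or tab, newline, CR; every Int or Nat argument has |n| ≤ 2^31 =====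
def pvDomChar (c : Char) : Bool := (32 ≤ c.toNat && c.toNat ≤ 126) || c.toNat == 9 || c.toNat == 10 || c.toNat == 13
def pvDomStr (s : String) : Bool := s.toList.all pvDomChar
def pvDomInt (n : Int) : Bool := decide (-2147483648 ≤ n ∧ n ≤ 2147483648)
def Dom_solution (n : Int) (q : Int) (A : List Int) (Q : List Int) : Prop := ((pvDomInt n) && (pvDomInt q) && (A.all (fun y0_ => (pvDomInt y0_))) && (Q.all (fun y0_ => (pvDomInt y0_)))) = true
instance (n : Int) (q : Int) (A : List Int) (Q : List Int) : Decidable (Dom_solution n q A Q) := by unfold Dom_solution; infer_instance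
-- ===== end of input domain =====

-- B replaces sort + per-index binary search with a counting pass over Q and a
-- running prefix count (faster); A sorts Q in place, B does not mutate Q —
-- the equivalence proved here is about the return value only.

-- ===== PORT A =====
-- Q.sort(); for i, a in enumerate(A): bi = bisect_right(Q, i); if q - bi >= a: answer += 1
def solution (n : Int) (q : Int) (A : List Int) (Q : List Int) : Int :=
  let Qs := PySem.List.sorted Q (fun x => x) false
  (PySem.List.enumerate A 0).foldl
    (fun answer p =>
      let bi := PySem.List.bisectRight Qs p.1
      let num := q - (bi : Int)
      if num ≥ p.2 then answer + 1 else answer) 0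

-- ===== PORT B =====
-- one pass over Q: count negatives (below) and a dict histogram of values in [0, len(A));
-- then one pass over enumerate(A) with running prefix count le
def solution_alt (n : Int) (q : Int) (A : List Int) (Q : List Int) : Int :=
  let m := A.length
  let hb := Q.foldl
    (fun (s : PySem.Dict Int Int × Int) x =>
      if x < 0 then (s.1, s.2 + 1)
      else if x < (m : Int) then (s.1.insert x (s.1.getD x 0 + 1), s.2)
      else s) (PySem.Dict.empty, 0)
  let res := (PySem.List.enumerate A 0).foldl
    (fun (s : Int × Int) p =>
      let le := s.2 + hb.1.getD p.1 0
      (if q - le ≥ p.2 then s.1 + 1 else s.1, le)) (0, hb.2)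
  res.1

-- ===== PRECONDITION & SPEC =====
def Spec_solution (n : Int) (q : Int) (A : List Int) (Q : List Int) (out : Int) : Prop := out = solution_alt n q A Q
instance (n : Int) (q : Int) (A : List Int) (Q : List Int) (out : Int) : Decidable (Spec_solution n q A Q out) := by unfold Spec_solution; infer_instance

-- ===== CLAIM (what is proved, stated in full; the proofs are below) =====
def Claim_equal_solution : Prop := ∀ (n : Int) (q : Int) (A : List Int) (Q : List Int), Dom_solution n q A Q → Spec_solution n q A Q (solution n q A Q)

-- ===== LEMMAS AND PROOFS =====

-- bisect_right on a sorted list counts the elements ≤ x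
lemma bisect_count (ys : List Int) (x : Int) (h : ys.Pairwise (· ≤ ·)) :
    PySem.List.bisectRight ys x = ys.countP (fun y => decide (y ≤ x)) := by
  obtain ⟨hle, hlo, hhi⟩ := PySem.List.bisectRight_spec ys x h
  set b := PySem.List.bisectRight ys x with hbdef
  conv_rhs => rw [← List.take_append_drop b ys]
  rw [List.countP_append]
  have h1 : (ys.take b).countP (fun y => decide (y ≤ x)) = (ys.take b).length := by
    rw [List.countP_eq_length]
    intro a ha
    obtain ⟨i, hi, rfl⟩ := List.mem_iff_getElem.mp ha
    rw [List.getElem_take]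
    simp only [List.length_take] at hi
    exact decide_eq_true (hlo i (by omega) (by omega))
  have h2 : (ys.drop b).countP (fun y => decide (y ≤ x)) = 0 := by
    rw [List.countP_eq_zero]
    intro a ha
    obtain ⟨i, hi, rfl⟩ := List.mem_iff_getElem.mp ha
    rw [List.getElem_drop]
    simp only [List.length_drop] at hi
    have := hhi (b + i) (by omega) (by omega)
    simp only [decide_eq_true_eq]
    omega
  rw [h1, h2, List.length_take]
  omega

-- the counting pass over Q: below counts the negatives, the dict counts each value in [0, m)
lemma hist_char (m : Nat) (Q : List Int) (d : PySem.Dict Int Int) (b : Int) :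
    (Q.foldl (fun (s : PySem.Dict Int Int × Int) x =>
        if x < 0 then (s.1, s.2 + 1)
        else if x < (m : Int) then (s.1.insert x (s.1.getD x 0 + 1), s.2)
        else s) (d, b)).2 = b + (Q.countP (fun y => decide (y < 0)) : Int) ∧
    ∀ k : Int, 0 ≤ k → k < (m : Int) →
      (Q.foldl (fun (s : PySem.Dict Int Int × Int) x =>
        if x < 0 then (s.1, s.2 + 1)
        else if x < (m : Int) then (s.1.insert x (s.1.getD x 0 + 1), s.2)
        else s) (d, b)).1.getD k 0 = d.getD k 0 + (Q.count k : Int) := by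
  induction Q generalizing d b with
  | nil => simp
  | cons x Q ih =>
    by_cases hx0 : x < 0
    · simp only [List.foldl_cons, if_pos hx0]
      obtain ⟨ih1, ih2⟩ := ih d (b + 1)
      refine ⟨?_, ?_⟩
      · rw [ih1, List.countP_cons]
        simp [hx0]; ring
      · intro k hk0 hkm
        rw [ih2 k hk0 hkm, List.count_cons]
        have : ¬ (x == k) = true := by simp; omega
        simp [this]
    · by_cases hxm : x < (m : Int)
      · simp only [List.foldl_cons, if_neg hx0, if_pos hxm]
        obtain ⟨ih1, ih2⟩ := ih (d.insert x (d.getD x 0 + 1)) b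
        refine ⟨?_, ?_⟩
        · rw [ih1, List.countP_cons]
          simp [hx0]
        · intro k hk0 hkm
          rw [ih2 k hk0 hkm, PySem.Dict.getD_insert, List.count_cons]
          by_cases hxk : k = x
          · simp [hxk]; ring
          · have : ¬ (x == k) = true := by simp; omega
            simp [hxk, this]
      · simp only [List.foldl_cons, if_neg hx0, if_neg hxm]
        obtain ⟨ih1, ih2⟩ := ih d b
        refine ⟨?_, ?_⟩
        · rw [ih1, List.countP_cons]
          simp [hx0]
        · intro k hk0 hkm
          rw [ih2 k hk0 hkm, List.count_cons]
          have : ¬ (x == k) = true := by simp; omega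
          simp [this]

lemma countP_lt_succ (Q : List Int) (s : Int) :
    Q.countP (fun y => decide (y < s + 1)) = Q.countP (fun y => decide (y < s)) + Q.count s := by
  induction Q with
  | nil => simp
  | cons x Q ih =>
    rw [List.countP_cons, List.countP_cons, List.count_cons, ih]
    by_cases h1 : x < s
    · have h2 : x < s + 1 := by omega
      have h3 : ¬ (x == s) = true := by simp; omega
      simp [h1, h2, h3]; omega
    · by_cases h2 : x = s
      · simp [h2]; omega
      · have h3 : ¬ x < s + 1 := by omega
        have h4 : ¬ (x == s) = true := by simp; omega
        simp [h1, h3, h4]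

lemma countP_le_eq (Q : List Int) (s : Int) :
    Q.countP (fun y => decide (y ≤ s)) = Q.countP (fun y => decide (y < s + 1)) := by
  apply List.countP_congr
  intro y _
  constructor <;> (intro h; simp at h ⊢; omega)

-- B's second loop, generalized over the start index and both accumulators
lemma loopB (q : Int) (Q : List Int) (m : Nat) (d : PySem.Dict Int Int)
    (hd : ∀ k : Int, 0 ≤ k → k < (m : Int) → d.getD k 0 = (Q.count k : Int)) :
    ∀ (L : List Int) (s acc le : Int),
      0 ≤ s → s + L.length ≤ (m : Int) →
      le = (Q.countP (fun y => decide (y < s)) : Int) →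
      ((PySem.List.enumerate L s).foldl
        (fun (st : Int × Int) p =>
          let le' := st.2 + d.getD p.1 0
          (if q - le' ≥ p.2 then st.1 + 1 else st.1, le')) (acc, le)).1 =
      (PySem.List.enumerate L s).foldl
        (fun ans p => if q - (Q.countP (fun y => decide (y ≤ p.1)) : Int) ≥ p.2 then ans + 1 else ans) acc := by
  intro L
  induction L with
  | nil => intro s acc le _ _ _; simp [PySem.List.enumerate_nil]
  | cons a L ih =>
    intro s acc le hs hlen hle
    rw [PySem.List.enumerate_cons, List.foldl_cons, List.foldl_cons]
    have hbound : s < (m : Int) := by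
      simp only [List.length_cons] at hlen
      push_cast at hlen; omega
    have hcnt : le + d.getD s 0 = (Q.countP (fun y => decide (y ≤ s)) : Int) := by
      rw [hle, hd s hs hbound, countP_le_eq Q s, countP_lt_succ Q s]
      push_cast; ring
    simp only [hcnt]
    apply ih (s + 1) _ _ (by omega)
      (by simp only [List.length_cons] at hlen; push_cast at hlen ⊢; omega)
    exact_mod_cast countP_le_eq Q s

-- ===== VERDICT (by name: the statement is the Claim_ definition above) =====
theorem solution_spec : Claim_equal_solution := by
  unfold Claim_equal_solution Spec_solution
  intro n q A Q _
  simp only [solution, solution_alt]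
  have hpair : (PySem.List.sorted Q (fun x => x) false).Pairwise (· ≤ ·) :=
    PySem.List.sorted_pairwise Q (fun x => x)
  have hperm : (PySem.List.sorted Q (fun x => x) false).Perm Q :=
    PySem.List.sorted_perm Q (fun x => x) false
  have hb : ∀ i : Int, PySem.List.bisectRight (PySem.List.sorted Q (fun x => x) false) i
      = Q.countP (fun y => decide (y ≤ i)) := by
    intro i
    rw [bisect_count _ _ hpair, hperm.countP_eq]
  obtain ⟨h2, h1⟩ := hist_char A.length Q PySem.Dict.empty 0
  have hed : ∀ k : Int, 0 ≤ k → k < (A.length : Int) →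
      (Q.foldl (fun (s : PySem.Dict Int Int × Int) x =>
        if x < 0 then (s.1, s.2 + 1)
        else if x < (A.length : Int) then (s.1.insert x (s.1.getD x 0 + 1), s.2)
        else s) (PySem.Dict.empty, 0)).1.getD k 0 = (Q.count k : Int) := by
    intro k hk0 hkm
    rw [h1 k hk0 hkm]
    simp [PySem.Dict.empty, PySem.Dict.getD, PySem.Dict.get?]
  rw [loopB q Q A.length _ hed A 0 0 _ le_rfl (by simp) (by rw [h2]; simp)]
  simp only [hb]
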